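-- pv_equiv track=rewrite | github.com/EvVPEvVP/hexlet-git | Task26.py | white_walkers
-- ===== SOURCE A (Python) =====
-- def white_walkers(village: str) -> bool:
--     result = False
--
--     for i in range(len(village)):
--         lst = []
--         if not village[i].isdigit():
--             continue
--         for j in range(i + 1, len(village)):
--             if not village[j].isdigit():
--                 lst.append(village[j])
--             else:
--                 break
--         if i != (len(village) - 1) and village[i].isdigit() and village[j].isdigit() and (
--                 int(village[i]) + int(village[j]) != 10):
--             continue
--         elif i != (len(village) - 1) and village[i].isdigit() and village[j].isdigit() and (
--                 int(village[i]) + int(village[j]) == 10) and lst.count('=') == 3: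
--             result = True
--         elif i != (len(village) - 1) and village[i].isdigit() and village[j].isdigit() and (
--                 int(village[i]) + int(village[j]) == 10) and lst.count('=') != 3:
--             result = False
--             break
--
--     if result:
--         return True
--     return False
-- ===== SOURCE B (Python) =====
-- def white_walkers(village: str) -> bool:
--     result = False
--     prev = None
--     eq = 0
--     for ch in village:
--         if ch.isdigit():
--             d = int(ch)
--             if prev is not None and prev + d == 10:
--                 if eq == 3:
--                     result = True
--                 else:
--                     result = False
--                     break
--             prev = d
--             eq = 0
--         elif ch == '=':
--             eq += 1
--     return result
-- ===== Notes on version B (the rewrite author's own statement) =====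
-- stated objective: simpler
-- what changed: Replaced A's outer loop that restarts an inner scan to the next digit at every digit position (plus a triple-duplicated guard chain over a stale inner index) by a single forward pass keeping the previous digit and a running count of equals-sign characters seen since it.
import Mathlib
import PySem

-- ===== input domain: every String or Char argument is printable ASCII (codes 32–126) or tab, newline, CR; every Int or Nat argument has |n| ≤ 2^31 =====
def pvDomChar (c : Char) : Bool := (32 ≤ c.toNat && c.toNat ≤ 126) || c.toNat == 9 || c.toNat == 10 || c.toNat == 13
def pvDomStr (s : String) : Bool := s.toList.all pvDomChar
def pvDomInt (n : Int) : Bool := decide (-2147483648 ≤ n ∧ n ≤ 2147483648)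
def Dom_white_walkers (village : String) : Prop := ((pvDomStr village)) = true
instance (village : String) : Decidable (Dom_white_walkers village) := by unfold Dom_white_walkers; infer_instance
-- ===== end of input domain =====

-- B replaces A's rescan-ahead outer loop (an inner scan to the next digit restarted at every
-- digit position) by one forward pass keeping the previous digit and a count of the
-- equals signs seen since it (objective: simpler, one pass).

-- ===== PORT A =====
-- int(c) for a single decimal digit character (A only applies it to chars that pass isdigit,
-- which on the printable-ASCII domain are exactly '0'..'9', where this is exact)
def pvDigitVal (c : Char) : Int := (c.toNat : Int) - 48

-- inner loop `for j in range(i + 1, len(village))`: cs is the suffix starting at index j0,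
-- lst the accumulator; returns the final lst and, if the loop ran at least once, the final j
-- together with village[j] (none = zero iterations; Python's j is then stale and never read,
-- every later use being short-circuited behind `i != len(village) - 1`)
def wwInner : List Char → Nat → List Char → List Char × Option (Nat × Char)
  | [], _, lst => (lst, none)
  | c :: rest, j, lst =>
    if PySem.Chars.isdigit c then (lst, some (j, c))       -- break at the first digit
    else
      match wwInner rest (j + 1) (lst ++ [c]) with
      | (l, none) => (l, some (j, c))                      -- loop exhausted: j = last index
      | (l, some p) => (l, some p)

-- outer loop `for i in range(len(village))`, acting on the suffix starting at index i and
-- carrying `result`; the three guard chains are A's three if/elif conditions in order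
def wwOuter (n : Nat) : List Char → Nat → Bool → Bool
  | [], _, result => result
  | c :: rest, i, result =>
    if PySem.Chars.isdigit c = false then wwOuter n rest (i + 1) result     -- continue
    else
      match wwInner rest (i + 1) [] with
      | (_, none) =>
        -- i = len-1: each guard starts with `i != len(village) - 1`, so all fall through
        wwOuter n rest (i + 1) result
      | (lst, some (_, cj)) =>
        if i ≠ n - 1 ∧ PySem.Chars.isdigit c = true ∧ PySem.Chars.isdigit cj = true ∧
            pvDigitVal c + pvDigitVal cj ≠ 10 then
          wwOuter n rest (i + 1) result                    -- continue
        else if i ≠ n - 1 ∧ PySem.Chars.isdigit c = true ∧ PySem.Chars.isdigit cj = true ∧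
            pvDigitVal c + pvDigitVal cj = 10 ∧ PySem.List.count lst '=' = 3 then
          wwOuter n rest (i + 1) true                      -- result = True
        else if i ≠ n - 1 ∧ PySem.Chars.isdigit c = true ∧ PySem.Chars.isdigit cj = true ∧
            pvDigitVal c + pvDigitVal cj = 10 ∧ PySem.List.count lst '=' ≠ 3 then
          false                                            -- result = False; break; return False
        else wwOuter n rest (i + 1) result

def white_walkers (village : String) : Bool :=
  wwOuter village.toList.length village.toList 0 false     -- `if result: return True / return False`

-- ===== PORT B =====
-- one pass: prev = last digit seen (None initially), eq = number of '=' since that digit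
def wwScan : List Char → Option Int → Int → Bool → Bool
  | [], _, _, result => result
  | c :: rest, prev, eq, result =>
    if PySem.Chars.isdigit c then
      let d : Int := (c.toNat : Int) - 48
      match prev with
      | some p =>
        if p + d = 10 then
          if eq = 3 then wwScan rest (some d) 0 true
          else false                                       -- result = False; break
        else wwScan rest (some d) 0 result
      | none => wwScan rest (some d) 0 result
    else if c = '=' then wwScan rest prev (eq + 1) result
    else wwScan rest prev eq result

def white_walkers_alt (village : String) : Bool :=
  wwScan village.toList none 0 false

-- ===== PRECONDITION & SPEC =====
def Spec_white_walkers (village : String) (out : Bool) : Prop := out = white_walkers_alt village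
instance (village : String) (out : Bool) : Decidable (Spec_white_walkers village out) := by unfold Spec_white_walkers; infer_instance

-- ===== CLAIM (what is proved, stated in full; the proofs are below) =====
def Claim_equal_white_walkers : Prop := ∀ (village : String), Dom_white_walkers village → Spec_white_walkers village (white_walkers village)

-- ===== LEMMAS AND PROOFS =====

theorem wwInner_break (mid : List Char) (c : Char) (rest : List Char)
    (hmid : ∀ x ∈ mid, PySem.Chars.isdigit x = false) (hc : PySem.Chars.isdigit c = true) :
    ∀ j lst, wwInner (mid ++ c :: rest) j lst = (lst ++ mid, some (j + mid.length, c)) := by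
  induction mid with
  | nil => intro j lst; simp [wwInner, hc]
  | cons x mid ih =>
    intro j lst
    have hx := hmid x (by simp)
    have hrec := ih (fun y hy => hmid y (by simp [hy])) (j + 1) (lst ++ [x])
    simp only [List.cons_append, wwInner, hx, Bool.false_eq_true, if_false]
    rw [hrec]
    simp [List.length_cons]
    omega

theorem wwInner_exhaust (mid : List Char) (hne : mid ≠ [])
    (hmid : ∀ x ∈ mid, PySem.Chars.isdigit x = false) :
    ∀ j lst, ∃ k c', wwInner mid j lst = (lst ++ mid, some (k, c')) ∧
      PySem.Chars.isdigit c' = false := by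
  induction mid with
  | nil => exact absurd rfl hne
  | cons x mid ih =>
    intro j lst
    have hx := hmid x (by simp)
    by_cases hm : mid = []
    · subst hm
      exact ⟨j, x, by simp [wwInner, hx], hx⟩
    · obtain ⟨k, c', heq, hc'⟩ := ih hm (fun y hy => hmid y (by simp [hy])) (j + 1) (lst ++ [x])
      refine ⟨k, c', ?_, hc'⟩
      simp only [wwInner, hx, Bool.false_eq_true, if_false]
      rw [heq]
      simp

theorem wwOuter_skip (mid : List Char) (hmid : ∀ x ∈ mid, PySem.Chars.isdigit x = false) :
    ∀ l n i r, wwOuter n (mid ++ l) i r = wwOuter n l (i + mid.length) r := by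
  induction mid with
  | nil => intro l n i r; simp
  | cons x mid ih =>
    intro l n i r
    have hx := hmid x (by simp)
    rw [List.cons_append, wwOuter, if_pos hx, ih (fun y hy => hmid y (by simp [hy]))]
    congr 1
    simp [List.length_cons]
    omega

theorem wwScan_skip (mid : List Char) (hmid : ∀ x ∈ mid, PySem.Chars.isdigit x = false) :
    ∀ l prev eq r, wwScan (mid ++ l) prev eq r = wwScan l prev (eq + (mid.count '=' : Int)) r := by
  induction mid with
  | nil => intro l prev eq r; simp
  | cons x mid ih =>
    intro l prev eq r
    have hx := hmid x (by simp)
    have ih' := ih (fun y hy => hmid y (by simp [hy]))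
    by_cases hxe : x = '='
    · subst hxe
      calc wwScan (('=' :: mid) ++ l) prev eq r = wwScan (mid ++ l) prev (eq + 1) r := by
            rw [List.cons_append, wwScan.eq_def]; simp [hx]
        _ = wwScan l prev (eq + 1 + (mid.count '=' : Int)) r := ih' l prev (eq + 1) r
        _ = wwScan l prev (eq + ((('=' :: mid).count '=' : Nat) : Int)) r := by
            congr 1
            simp
            ring
    · calc wwScan ((x :: mid) ++ l) prev eq r = wwScan (mid ++ l) prev eq r := by
            rw [List.cons_append, wwScan.eq_def]; simp [hx, hxe]
        _ = wwScan l prev (eq + (mid.count '=' : Int)) r := ih' l prev eq r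
        _ = wwScan l prev (eq + (((x :: mid).count '=' : Nat) : Int)) r := by
            congr 2
            simp [hxe]

theorem dropWhile_head_false {α : Type} {p : α → Bool} : ∀ (l : List α) (d : α) (t : List α),
    l.dropWhile p = d :: t → p d = false := by
  intro l
  induction l with
  | nil => intro d t h; simp [List.dropWhile] at h
  | cons x xs ih =>
    intro d t h
    rw [List.dropWhile_cons] at h
    by_cases hp : p x
    · rw [if_pos hp] at h; exact ih _ _ h
    · rw [if_neg hp] at h
      cases h
      simpa using hp

theorem wwScan_digit (c : Char) (hc : PySem.Chars.isdigit c = true)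
    (rest : List Char) (p eq : Int) (r : Bool) :
    wwScan (c :: rest) (some p) eq r =
      if p + ((c.toNat : Int) - 48) = 10 then
        (if eq = 3 then wwScan rest (some ((c.toNat : Int) - 48)) 0 true else false)
      else wwScan rest (some ((c.toNat : Int) - 48)) 0 r := by
  rw [wwScan.eq_def]
  simp only [hc, if_true]

theorem ww_main : ∀ (len : Nat) (rest : List Char) (c : Char) (n i : Nat) (r : Bool),
    rest.length ≤ len → PySem.Chars.isdigit c = true → i + 1 + rest.length = n →
    wwOuter n (c :: rest) i r = wwScan rest (some (pvDigitVal c)) 0 r := by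
  intro len
  induction len with
  | zero =>
    intro rest c n i r hlen hc hn
    have : rest = [] := List.eq_nil_of_length_eq_zero (Nat.le_zero.mp hlen)
    subst this
    simp [wwOuter, wwInner, wwScan, hc]
  | succ len ih =>
    intro rest c n i r hlen hc hn
    have hsplit : rest = rest.takeWhile (fun x => !PySem.Chars.isdigit x) ++
        rest.dropWhile (fun x => !PySem.Chars.isdigit x) := (List.takeWhile_append_dropWhile).symm
    set mid := rest.takeWhile (fun x => !PySem.Chars.isdigit x) with hmiddef
    have hmid : ∀ x ∈ mid, PySem.Chars.isdigit x = false := by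
      intro x hx
      have := List.mem_takeWhile_imp hx
      simpa using this
    cases hdw : rest.dropWhile (fun x => !PySem.Chars.isdigit x) with
    | nil =>
      have hrest : rest = mid := by rw [hsplit, hdw, List.append_nil]
      by_cases hmn : mid = []
      · rw [hrest, hmn]
        simp [wwOuter, wwInner, wwScan, hc]
      · obtain ⟨k, c', heq, hc'⟩ := wwInner_exhaust mid hmn hmid (i + 1) []
        simp only [List.nil_append] at heq
        rw [hrest, wwOuter, if_neg (by simp [hc]), heq]
        simp only
        rw [if_neg (by simp [hc']), if_neg (by simp [hc']), if_neg (by simp [hc'])]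
        have h1 := wwOuter_skip mid hmid [] n (i + 1) r
        have h2 := wwScan_skip mid hmid [] (some (pvDigitVal c)) 0 r
        simp only [List.append_nil] at h1 h2
        rw [h1, h2]
        rfl
    | cons d2 rest2 =>
      have hd2 : PySem.Chars.isdigit d2 = true := by
        have h := dropWhile_head_false rest d2 rest2 hdw
        simpa using h
      have hrest : rest = mid ++ d2 :: rest2 := by rw [hsplit, hdw]
      have hlens : rest.length = mid.length + (rest2.length + 1) := by rw [hrest]; simp
      have hlen2 : rest2.length ≤ len := by omega
      have hne : i ≠ n - 1 := by omega
      have hinner := wwInner_break mid d2 rest2 hmid hd2 (i + 1) []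
      simp only [List.nil_append] at hinner
      rw [hrest, wwOuter, if_neg (by simp [hc]), hinner]
      simp only
      rw [wwScan_skip mid hmid (d2 :: rest2) (some (pvDigitVal c)) 0 r]
      by_cases hS : pvDigitVal c + pvDigitVal d2 = 10
      · by_cases hk : PySem.List.count mid '=' = 3
        · rw [if_neg (by simp [hS]), if_pos ⟨hne, hc, hd2, hS, hk⟩]
          have hL : wwOuter n (mid ++ d2 :: rest2) (i + 1) true =
              wwScan rest2 (some (pvDigitVal d2)) 0 true := by
            rw [wwOuter_skip mid hmid]
            exact ih rest2 d2 n (i + 1 + mid.length) true hlen2 hd2 (by omega)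
          rw [hL, wwScan_digit d2 hd2]
          have hkc : (0 : Int) + (mid.count '=' : Int) = 3 := by
            have hk' : mid.count '=' = 3 := by simpa [PySem.List.count] using hk
            simp [hk']
          rw [if_pos (by simpa [pvDigitVal] using hS), if_pos hkc]
          simp [pvDigitVal]
        · have hk' : List.count '=' mid ≠ 3 := by simpa [PySem.List.count] using hk
          rw [if_neg (by simp [hS]), if_neg (by simp [hk']), if_pos ⟨hne, hc, hd2, hS, hk⟩]
          rw [wwScan_digit d2 hd2]
          have hkc : ¬ ((0 : Int) + (mid.count '=' : Int) = 3) := by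
            intro h
            apply hk
            simp [PySem.List.count]
            omega
          rw [if_pos (by simpa [pvDigitVal] using hS), if_neg hkc]
      · rw [if_pos ⟨hne, hc, hd2, hS⟩]
        have hL : wwOuter n (mid ++ d2 :: rest2) (i + 1) r =
            wwScan rest2 (some (pvDigitVal d2)) 0 r := by
          rw [wwOuter_skip mid hmid]
          exact ih rest2 d2 n (i + 1 + mid.length) r hlen2 hd2 (by omega)
        rw [hL, wwScan_digit d2 hd2]
        rw [if_neg (by simpa [pvDigitVal] using hS)]
        simp [pvDigitVal]

-- B consumes the digit-free head with prev = none the same way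
theorem wwScan_digit_none (c : Char) (hc : PySem.Chars.isdigit c = true)
    (rest : List Char) (eq : Int) (r : Bool) :
    wwScan (c :: rest) none eq r = wwScan rest (some ((c.toNat : Int) - 48)) 0 r := by
  rw [wwScan.eq_def]
  simp only [hc, if_true]

-- the two loops agree from the start
theorem ww_top (l : List Char) : wwOuter l.length l 0 false = wwScan l none 0 false := by
  have hsplit : l = l.takeWhile (fun x => !PySem.Chars.isdigit x) ++
      l.dropWhile (fun x => !PySem.Chars.isdigit x) := (List.takeWhile_append_dropWhile).symm
  set mid := l.takeWhile (fun x => !PySem.Chars.isdigit x) with hmiddef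
  have hmid : ∀ x ∈ mid, PySem.Chars.isdigit x = false := by
    intro x hx
    have := List.mem_takeWhile_imp hx
    simpa using this
  cases hdw : l.dropWhile (fun x => !PySem.Chars.isdigit x) with
  | nil =>
    have hl : l = mid := by rw [hsplit, hdw, List.append_nil]
    rw [hl]
    have h1 := wwOuter_skip mid hmid [] mid.length 0 false
    have h2 := wwScan_skip mid hmid [] none 0 false
    simp only [List.append_nil] at h1 h2
    rw [h1, h2]
    rfl
  | cons d rest =>
    have hd : PySem.Chars.isdigit d = true := by
      have h := dropWhile_head_false l d rest hdw
      simpa using h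
    have hl : l = mid ++ d :: rest := by rw [hsplit, hdw]
    have hlens : l.length = mid.length + (rest.length + 1) := by rw [hl]; simp
    obtain ⟨n, hn⟩ : ∃ n, l.length = n := ⟨_, rfl⟩
    rw [hn]
    calc wwOuter n l 0 false
        = wwOuter n (d :: rest) (0 + mid.length) false := by
          rw [hl]
          exact wwOuter_skip mid hmid (d :: rest) n 0 false
      _ = wwScan rest (some (pvDigitVal d)) 0 false := by
          exact ww_main rest.length rest d n (0 + mid.length) false le_rfl hd (by omega)
      _ = wwScan l none 0 false := by
          rw [hl, wwScan_skip mid hmid (d :: rest) none 0 false, wwScan_digit_none d hd]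
          simp [pvDigitVal]

-- ===== VERDICT (by name: the statement is the Claim_ definition above) =====
theorem white_walkers_spec : Claim_equal_white_walkers := by
  intro village _
  unfold Spec_white_walkers white_walkers white_walkers_alt
  exact ww_top village.toList
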